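-- pv_equiv track=rewrite | github.com/y-dai20/Whereabout | base/views/functions.py | get_combined_list
-- ===== SOURCE A (Python) =====
-- def get_combined_list(name1:str, list1:list, name2:str, list2:list):
--     combined_list = []
--     len1 = len(list1)
--     len2 = len(list2)
--     for i in range(max(len1, len2)):
--         combined_list.append({
--             name1:list1[i] if i < len1 else None,
--             name2:list2[i] if i < len2 else None,
--         })
--     return combined_list
-- ===== SOURCE B (Python) =====
-- def get_combined_list(name1: str, list1: list, name2: str, list2: list):
--     # Stage 1: pair up the common prefix directly with zip (no indices, no bounds checks).
--     out = [{name1: a, name2: b} for a, b in zip(list1, list2)]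
--     # Stage 2: exactly one of these slices is non-empty -- the surplus of the longer list.
--     k = len(out)
--     out += [{name1: a, name2: None} for a in list1[k:]]
--     out += [{name1: None, name2: b} for b in list2[k:]]
--     return out
-- ===== Notes on version B (the rewrite author's own statement) =====
-- stated objective: idiomatic
-- what changed: Replaces the single index loop over range(max(len1,len2)) with its two per-iteration bounds-check branches by staged passes: zip pairs the common prefix, then the surplus slice of whichever list is longer is appended with None partners.
import Mathlib
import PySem

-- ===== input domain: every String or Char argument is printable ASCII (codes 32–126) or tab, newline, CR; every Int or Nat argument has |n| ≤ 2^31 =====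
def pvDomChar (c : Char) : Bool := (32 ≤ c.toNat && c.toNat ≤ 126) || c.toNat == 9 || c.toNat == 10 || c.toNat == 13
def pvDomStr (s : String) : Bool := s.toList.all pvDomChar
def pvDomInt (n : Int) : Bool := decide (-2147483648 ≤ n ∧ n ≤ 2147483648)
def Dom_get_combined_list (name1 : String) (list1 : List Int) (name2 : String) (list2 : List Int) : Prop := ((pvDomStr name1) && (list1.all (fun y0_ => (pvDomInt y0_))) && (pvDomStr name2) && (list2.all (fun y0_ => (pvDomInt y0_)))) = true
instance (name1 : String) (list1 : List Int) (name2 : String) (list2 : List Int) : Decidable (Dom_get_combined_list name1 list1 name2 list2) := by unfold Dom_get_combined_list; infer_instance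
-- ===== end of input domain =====

-- B replaces A's index loop over range(max(len1,len2)) with staged passes: zip pairs the
-- common prefix, then the surplus slice of the longer list is appended with None partners
-- (idiomatic; same cost). A dict literal {name1: v1, name2: v2} is ported as the
-- association list of a two-step Dict insertion (overwrite if name1 = name2).

-- ===== PORT A =====
-- one dict literal {name1: v1, name2: v2} (second insert overwrites the first if keys equal)
def pvPairDict (name1 : String) (v1 : Option Int) (name2 : String) (v2 : Option Int) :
    List (String × Option Int) :=
  ((PySem.Dict.empty.insert name1 v1).insert name2 v2).items

def get_combined_list (name1 : String) (list1 : List Int) (name2 : String) (list2 : List Int) :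
    List (List (String × Option Int)) :=
  let len1 : Int := list1.length
  let len2 : Int := list2.length
  (PySem.List.pyRange 0 (max len1 len2)).foldl
    (fun combined_list i =>
      combined_list ++
        [pvPairDict name1 (if i < len1 then PySem.List.pyGet? list1 i else none)
                    name2 (if i < len2 then PySem.List.pyGet? list2 i else none)]) []

-- ===== PORT B =====
def get_combined_list_alt (name1 : String) (list1 : List Int) (name2 : String) (list2 : List Int) :
    List (List (String × Option Int)) :=
  let out := (list1.zip list2).map (fun p => pvPairDict name1 (some p.1) name2 (some p.2))
  let k : Int := out.length
  (out ++ (PySem.List.slice list1 (some k) none).map (fun a => pvPairDict name1 (some a) name2 none))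
    ++ (PySem.List.slice list2 (some k) none).map (fun b => pvPairDict name1 none name2 (some b))

-- ===== PRECONDITION & SPEC =====
def Spec_get_combined_list (name1 : String) (list1 : List Int) (name2 : String) (list2 : List Int) (out : List (List (String × Option Int))) : Prop := out = get_combined_list_alt name1 list1 name2 list2
instance (name1 : String) (list1 : List Int) (name2 : String) (list2 : List Int) (out : List (List (String × Option Int))) : Decidable (Spec_get_combined_list name1 list1 name2 list2 out) := by unfold Spec_get_combined_list; infer_instance

-- ===== CLAIM (what is proved, stated in full; the proofs are below) =====
def Claim_equal_get_combined_list : Prop := ∀ (name1 : String) (list1 : List Int) (name2 : String) (list2 : List Int), Dom_get_combined_list name1 list1 name2 list2 → Spec_get_combined_list name1 list1 name2 list2 (get_combined_list name1 list1 name2 list2)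

-- ===== LEMMAS AND PROOFS =====

-- the common value both programs compute: position i holds {name1: l1[i]?, name2: l2[i]?}
def pvCanon (name1 : String) (l1 : List Int) (name2 : String) (l2 : List Int) :
    List (List (String × Option Int)) :=
  (List.range (max l1.length l2.length)).map
    (fun i => pvPairDict name1 l1[i]? name2 l2[i]?)

-- A's guarded index expression is just optional indexing
theorem pvGuard_eq (l : List Int) (i : Nat) :
    (if (i : Int) < (l.length : Int) then PySem.List.pyGet? l (i : Int) else none) = l[i]? := by
  split_ifs with h
  · exact PySem.List.pyGet?_natCast l i
  · have hi : l.length ≤ i := by exact_mod_cast not_lt.mp h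
    exact (List.getElem?_eq_none hi).symm

theorem pvA_eq (name1 : String) (list1 : List Int) (name2 : String) (list2 : List Int) :
    get_combined_list name1 list1 name2 list2 = pvCanon name1 list1 name2 list2 := by
  unfold get_combined_list pvCanon
  simp only
  rw [PySem.List.foldl_append_singleton_eq_map]
  have hmax : max (list1.length : Int) (list2.length : Int)
      = ((max list1.length list2.length : Nat) : Int) := by
    simp [Nat.cast_max]
  rw [hmax, PySem.List.pyRange_zero_natCast, List.nil_append, List.map_map]
  refine List.map_congr_left (fun i _ => ?_)
  simp only [Function.comp_apply]
  rw [pvGuard_eq, pvGuard_eq]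

-- recursion equations for pvCanon
theorem pvCanon_nil_left (name1 name2 : String) (l2 : List Int) :
    pvCanon name1 [] name2 l2 = l2.map (fun b => pvPairDict name1 none name2 (some b)) := by
  unfold pvCanon
  apply List.ext_getElem
  · simp
  · intro i h1 h2
    have hi : i < l2.length := by simpa using h2
    simp [List.getElem?_eq_getElem hi]

theorem pvCanon_nil_right (name1 name2 : String) (l1 : List Int) :
    pvCanon name1 l1 name2 [] = l1.map (fun a => pvPairDict name1 (some a) name2 none) := by
  unfold pvCanon
  apply List.ext_getElem
  · simp
  · intro i h1 h2
    have hi : i < l1.length := by simpa using h2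
    simp [List.getElem?_eq_getElem hi]

theorem pvCanon_cons (name1 name2 : String) (a b : Int) (t1 t2 : List Int) :
    pvCanon name1 (a :: t1) name2 (b :: t2)
      = pvPairDict name1 (some a) name2 (some b) :: pvCanon name1 t1 name2 t2 := by
  unfold pvCanon
  have hmx : max (a :: t1).length (b :: t2).length = max t1.length t2.length + 1 := by
    simp
  rw [hmx, List.range_succ_eq_map, List.map_cons, List.map_map]
  simp [Function.comp_def]

-- recursion equations for B's port
theorem pvAlt_nil_left (name1 name2 : String) (l2 : List Int) :
    get_combined_list_alt name1 [] name2 l2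
      = l2.map (fun b => pvPairDict name1 none name2 (some b)) := by
  unfold get_combined_list_alt
  simp [PySem.List.slice_none_none]

theorem pvAlt_nil_right (name1 name2 : String) (l1 : List Int) :
    get_combined_list_alt name1 l1 name2 []
      = l1.map (fun a => pvPairDict name1 (some a) name2 none) := by
  unfold get_combined_list_alt
  simp [PySem.List.slice_none_none]

theorem pvAlt_cons (name1 name2 : String) (a b : Int) (t1 t2 : List Int) :
    get_combined_list_alt name1 (a :: t1) name2 (b :: t2)
      = pvPairDict name1 (some a) name2 (some b)
          :: get_combined_list_alt name1 t1 name2 t2 := by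
  unfold get_combined_list_alt
  simp only [List.zip_cons_cons, List.map_cons, List.length_cons]
  rw [PySem.List.slice_from_natCast, PySem.List.slice_from_natCast,
    List.drop_succ_cons, List.drop_succ_cons,
    PySem.List.slice_from_natCast, PySem.List.slice_from_natCast]
  simp

theorem pvB_eq (name1 : String) (list1 : List Int) (name2 : String) (list2 : List Int) :
    get_combined_list_alt name1 list1 name2 list2 = pvCanon name1 list1 name2 list2 := by
  induction list1 generalizing list2 with
  | nil => rw [pvAlt_nil_left, pvCanon_nil_left]
  | cons a t1 ih =>
    cases list2 with
    | nil => rw [pvAlt_nil_right, pvCanon_nil_right]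
    | cons b t2 => rw [pvAlt_cons, pvCanon_cons, ih]

-- ===== VERDICT (by name: the statement is the Claim_ definition above) =====
theorem get_combined_list_spec : Claim_equal_get_combined_list := by
  intro name1 list1 name2 list2 _
  unfold Spec_get_combined_list
  rw [pvA_eq, pvB_eq]
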